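-- pv_equiv track=rewrite | github.com/blubbxyz/Ahripi | backend/app.py | looks_like_spam
-- ===== SOURCE A (Python) =====
-- def looks_like_spam(text: str) -> bool:
--     t = text.lower().strip()
--     if t.count("http://") + t.count("https://") > 1:
--         return True
--     if (("http://" in t) or ("https://" in t)) and len(t) < 25:
--         return True
--     banned = ["free money", "crypto", "forex", "porn", "viagra", "casino", "betting"]
--     if any(b in t for b in banned):
--         return True
--     if len(text) >= 50:
--         max_run = 1
--         run = 1
--         for i in range(1, len(text)):
--             if text[i] == text[i - 1]:
--                 run += 1
--                 max_run = max(max_run, run)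
--             else:
--                 run = 1
--         if max_run >= 12:
--             return True
--     return False
-- ===== SOURCE B (Python) =====
-- def looks_like_spam(text: str) -> bool:
--     t = text.lower().strip()
--     banned = ["free money", "crypto", "forex", "porn", "viagra", "casino", "betting"]
--     return (t.count("http://") + t.count("https://") > 1
--             or (("http://" in t) or ("https://" in t)) and len(t) < 25
--             or any(b in t for b in banned)
--             or len(text) >= 50 and any(c * 12 in text for c in set(text)))
-- ===== Notes on version B (the rewrite author's own statement) =====
-- stated objective: alternative
-- what changed: The early guard checks are kept, but A's manual run/max_run index scan for a character repeated 12+ times is replaced by a substring test: for each distinct character c of the text, check whether c*12 occurs in the text; the function also becomes a single boolean expression instead of an early-return chain.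
import Mathlib
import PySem

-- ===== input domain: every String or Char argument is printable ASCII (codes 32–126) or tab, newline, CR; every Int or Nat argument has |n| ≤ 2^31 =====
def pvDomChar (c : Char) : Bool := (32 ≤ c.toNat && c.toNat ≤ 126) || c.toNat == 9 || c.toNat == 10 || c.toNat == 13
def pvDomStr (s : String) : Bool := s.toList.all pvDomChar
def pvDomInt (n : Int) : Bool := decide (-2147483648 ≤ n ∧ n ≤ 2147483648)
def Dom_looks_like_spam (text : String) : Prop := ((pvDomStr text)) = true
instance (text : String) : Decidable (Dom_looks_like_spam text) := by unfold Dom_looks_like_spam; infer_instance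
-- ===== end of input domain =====

-- B keeps A's guard checks but replaces A's manual run/max_run index scan by a substring
-- test: some character occurs 12+ times in a row iff c*12 is a substring for some distinct c.

-- ===== PORT A =====
def looks_like_spam (text : String) : Bool :=
  let t := PySem.Str.strip (PySem.Str.lower text)
  if decide (1 < PySem.Str.count t "http://" + PySem.Str.count t "https://") then true
  else if (PySem.Str.isIn "http://" t || PySem.Str.isIn "https://" t)
          && decide (PySem.Str.len t < 25) then true
  else if (["free money", "crypto", "forex", "porn", "viagra", "casino", "betting"]
            : List String).any (fun b => PySem.Str.isIn b t) then true
  else if decide (50 ≤ PySem.Str.len text) then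
    -- for i in range(1, len(text)) over state (run, max_run); text[i] is always in range, so the total pyGetD is exact
    let st := (PySem.List.pyRange 1 (PySem.Str.len text) 1).foldl
      (fun (s : Nat × Nat) i =>
        if PySem.List.pyGetD text.toList i 'a' == PySem.List.pyGetD text.toList (i - 1) 'a'
        then (s.1 + 1, max s.2 (s.1 + 1)) else (1, s.2)) (1, 1)
    if decide (12 ≤ st.2) then true else false
  else false

-- ===== PORT B =====
def looks_like_spam_alt (text : String) : Bool :=
  let t := PySem.Str.strip (PySem.Str.lower text)
  let banned : List String := ["free money", "crypto", "forex", "porn", "viagra", "casino", "betting"]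
  decide (1 < PySem.Str.count t "http://" + PySem.Str.count t "https://")
  || ((PySem.Str.isIn "http://" t || PySem.Str.isIn "https://" t)
       && decide (PySem.Str.len t < 25))
  || banned.any (fun b => PySem.Str.isIn b t)
  || (decide (50 ≤ PySem.Str.len text)
       && (PySem.Set.ofList text.toList).any
            (fun c => PySem.Chars.isIn (List.replicate 12 c) text.toList))

-- ===== PRECONDITION & SPEC =====
def Spec_looks_like_spam (text : String) (out : Bool) : Prop := out = looks_like_spam_alt text
instance (text : String) (out : Bool) : Decidable (Spec_looks_like_spam text out) := by unfold Spec_looks_like_spam; infer_instance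

-- ===== CLAIM (what is proved, stated in full; the proofs are below) =====
def Claim_equal_looks_like_spam : Prop := ∀ (text : String), Dom_looks_like_spam text → Spec_looks_like_spam text (looks_like_spam text)

-- ===== LEMMAS AND PROOFS =====

/-- Structural form of A's run scan: state (run, max_run), previous character carried along. -/
def runScan : Char → Nat × Nat → List Char → Nat × Nat
  | _, s, [] => s
  | prev, s, c :: rest =>
      if c == prev then runScan c (s.1 + 1, max s.2 (s.1 + 1)) rest
      else runScan c (1, s.2) rest

theorem pyRange_one_nil (a b : Int) (h : b ≤ a) : PySem.List.pyRange a b 1 = [] := by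
  apply List.eq_nil_iff_forall_not_mem.2
  intro x hx
  have := (PySem.List.mem_pyRange_one).1 hx
  omega

/-- A's index fold over range(pre.length+1, cs.length) equals the structural scan of the tail. -/
theorem foldA_bridge (cs : List Char) (pre : List Char) (prev : Char) (rest : List Char)
    (hcs : cs = pre ++ prev :: rest) (s : Nat × Nat) :
    (PySem.List.pyRange ((pre.length : Int) + 1) ((cs.length : Nat) : Int) 1).foldl
      (fun (s : Nat × Nat) i =>
        if PySem.List.pyGetD cs i 'a' == PySem.List.pyGetD cs (i - 1) 'a'
        then (s.1 + 1, max s.2 (s.1 + 1)) else (1, s.2)) s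
    = runScan prev s rest := by
  induction rest generalizing pre prev s with
  | nil =>
      have hlen : cs.length = pre.length + 1 := by simp [hcs]
      rw [pyRange_one_nil _ _ (by rw [hlen]; push_cast; omega)]
      rfl
  | cons c rest ih =>
      have hlen : cs.length = pre.length + 2 + rest.length := by simp [hcs]; omega
      rw [PySem.List.pyRange_one_cons (by rw [hlen]; push_cast; omega)]
      rw [List.foldl_cons]
      have e1 : ((pre.length : Int) + 1) = ((pre.length + 1 : Nat) : Int) := by push_cast; ring
      have g1 : PySem.List.pyGetD cs ((pre.length : Int) + 1) 'a' = c := by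
        rw [e1, PySem.List.pyGetD_natCast, hcs]
        rw [List.getD_eq_getElem?_getD, List.getElem?_append_right (by omega)]
        simp
      have g2 : PySem.List.pyGetD cs ((pre.length : Int) + 1 - 1) 'a' = prev := by
        have e2 : ((pre.length : Int) + 1 - 1) = ((pre.length : Nat) : Int) := by ring
        rw [e2, PySem.List.pyGetD_natCast, hcs]
        rw [List.getD_eq_getElem?_getD, List.getElem?_append_right (by omega)]
        simp
      rw [g1, g2]
      have h' : cs = (pre ++ [prev]) ++ c :: rest := by simp [hcs]
      by_cases hc : c == prev
      · rw [if_pos hc]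
        have hrec := ih (pre ++ [prev]) c h' (s.1 + 1, max s.2 (s.1 + 1))
        have ecast : (((pre ++ [prev]).length : Int) + 1) = ((pre.length : Int) + 1 + 1) := by
          simp only [List.length_append, List.length_cons, List.length_nil]; omega
        rw [ecast] at hrec
        rw [hrec]
        simp [runScan, hc]
      · rw [if_neg hc]
        have hrec := ih (pre ++ [prev]) c h' (1, s.2)
        have ecast : (((pre ++ [prev]).length : Int) + 1) = ((pre.length : Int) + 1 + 1) := by
          simp only [List.length_append, List.length_cons, List.length_nil]; omega
        rw [ecast] at hrec
        rw [hrec]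
        simp [runScan, hc]

/-- A block of 12 equal characters in `replicate run prev ++ c :: rest` with `run < 12`
    and `c ≠ prev` cannot use the replicate part. -/
theorem rep_cross (d prev c : Char) (rest : List Char) :
    ∀ (run : Nat), run < 12 → ¬ c = prev →
    List.replicate 12 d <:+: List.replicate run prev ++ c :: rest →
    List.replicate 12 d <:+: c :: rest := by
  intro run
  induction run with
  | zero => intro _ _ h; simpa using h
  | succ n ih =>
      intro hlt hne h
      have h' : List.replicate 12 d <:+: prev :: (List.replicate n prev ++ c :: rest) := by
        simpa [List.replicate_succ] using h
      rcases List.infix_cons_iff.1 h' with hp | ht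
      · exfalso
        have h0 : (0 : Nat) < (List.replicate 12 d).length := by simp
        have hn1 : (n + 1) < (List.replicate 12 d).length := by simp; omega
        have e0 := hp.getElem h0
        have e1 := hp.getElem hn1
        rw [List.getElem_replicate] at e0 e1
        rw [List.getElem_cons_zero] at e0
        rw [List.getElem_cons_succ] at e1
        rw [List.getElem_append_right (by simp)] at e1
        simp at e1
        exact hne (e1.symm.trans e0)
      · exact ih (by omega) hne ht

/-- Characterisation of the scan: max run reaches 12 iff 12 equal consecutive characters exist. -/
theorem runScan_iff (rest : List Char) :
    ∀ (prev : Char) (run mr : Nat), 1 ≤ run → run ≤ mr →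
    (12 ≤ (runScan prev (run, mr) rest).2 ↔
      12 ≤ mr ∨ ∃ c, List.replicate 12 c <:+: (List.replicate run prev ++ rest)) := by
  induction rest with
  | nil =>
      intro prev run mr h1 h2
      simp only [runScan, List.append_nil]
      constructor
      · exact Or.inl
      · rintro (h | ⟨c, hc⟩)
        · exact h
        · have := hc.length_le; simp at this; omega
  | cons c rest ih =>
      intro prev run mr h1 h2
      by_cases hc : c = prev
      · subst hc
        simp only [runScan, beq_self_eq_true, if_true]
        rw [ih c (run + 1) (max mr (run + 1)) (by omega) (le_max_right _ _)]
        have hl : List.replicate run c ++ c :: rest = List.replicate (run + 1) c ++ rest := by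
          rw [List.replicate_succ', List.append_cons]
        rw [hl]
        by_cases h12 : 12 ≤ run + 1
        · have hH : ∃ e, List.replicate 12 e <:+: List.replicate (run + 1) c ++ rest := by
            refine ⟨c, List.IsPrefix.isInfix ?_⟩
            have hrep : List.replicate (run + 1) c
                = List.replicate 12 c ++ List.replicate (run + 1 - 12) c := by
              rw [← List.replicate_add]; congr 1; omega
            rw [hrep, List.append_assoc]
            exact List.prefix_append _ _
          rcases hH with ⟨e, he⟩
          constructor
          · intro _; exact Or.inr ⟨e, he⟩
          · intro _; exact Or.inr ⟨e, he⟩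
        · have hmax : (12 ≤ max mr (run + 1)) ↔ 12 ≤ mr := by
            constructor
            · intro h; rcases le_max_iff.1 h with h | h
              · exact h
              · omega
            · intro h; exact le_max_of_le_left h
          rw [hmax]
      · have hcb : (c == prev) = false := by simpa using hc
        simp only [runScan, hcb, Bool.false_eq_true, if_false]
        rw [ih c 1 mr le_rfl (le_trans h1 h2)]
        simp only [List.replicate_one, List.singleton_append]
        constructor
        · rintro (h | ⟨e, he⟩)
          · exact Or.inl h
          · exact Or.inr ⟨e, he.trans (List.suffix_append _ _).isInfix⟩
        · rintro (h | ⟨e, he⟩)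
          · exact Or.inl h
          · by_cases h12 : 12 ≤ mr
            · exact Or.inl h12
            · exact Or.inr ⟨e, rep_cross e prev c rest run (by omega) hc he⟩

/-- B's test over the distinct characters detects exactly a 12-block somewhere in the text. -/
theorem anySet_iff (cs : List Char) :
    ((PySem.Set.ofList cs).any (fun c => PySem.Chars.isIn (List.replicate 12 c) cs) = true)
      ↔ ∃ c, List.replicate 12 c <:+: cs := by
  rw [List.any_eq_true]
  constructor
  · rintro ⟨c, _, h⟩
    exact ⟨c, (PySem.Chars.isIn_iff_infix _ _).1 h⟩
  · rintro ⟨c, h⟩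
    refine ⟨c, ?_, (PySem.Chars.isIn_iff_infix _ _).2 h⟩
    exact (PySem.Set.mem_ofList _ _).2 (h.subset (List.mem_replicate.2 ⟨by norm_num, rfl⟩))

/-- The run-scan side of A equals B's distinct-character substring test (under len ≥ 50 the
    text is nonempty). -/
theorem main_key (text : String) (h4 : 50 ≤ PySem.Str.len text) :
    decide (12 ≤ ((PySem.List.pyRange 1 (PySem.Str.len text) 1).foldl
      (fun (s : Nat × Nat) i =>
        if PySem.List.pyGetD text.toList i 'a' == PySem.List.pyGetD text.toList (i - 1) 'a'
        then (s.1 + 1, max s.2 (s.1 + 1)) else (1, s.2)) (1, 1)).2)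
    = (PySem.Set.ofList text.toList).any
        (fun c => PySem.Chars.isIn (List.replicate 12 c) text.toList) := by
  have hlen : PySem.Str.len text = text.toList.length := by simp [pysem]
  obtain ⟨d, rest, hdr⟩ : ∃ d rest, text.toList = d :: rest := by
    cases hL : text.toList with
    | nil => rw [hlen, hL] at h4; simp at h4
    | cons d rest => exact ⟨d, rest, rfl⟩
  have hbridge := foldA_bridge text.toList [] d rest (by simpa using hdr) (1, 1)
  simp only [List.length_nil, Nat.cast_zero, zero_add] at hbridge
  rw [hlen, hbridge]
  have hiff : 12 ≤ (runScan d (1, 1) rest).2 ↔ ∃ c, List.replicate 12 c <:+: d :: rest := by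
    rw [runScan_iff rest d 1 1 le_rfl le_rfl]
    simp
  rw [Bool.eq_iff_iff]
  simp only [decide_eq_true_eq]
  rw [hiff, ← hdr]
  exact (anySet_iff text.toList).symm

-- ===== VERDICT (by name: the statement is the Claim_ definition above) =====
theorem looks_like_spam_spec : Claim_equal_looks_like_spam := by
  intro text _
  show looks_like_spam text = looks_like_spam_alt text
  unfold looks_like_spam looks_like_spam_alt
  simp only []
  split_ifs with h1 h2 h3 h4 h5
  · rw [h1]; simp
  · simp only [Bool.not_eq_true] at h1
    rw [h1, h2]; simp
  · simp only [Bool.not_eq_true] at h1 h2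
    rw [h1, h2, h3]; simp
  · simp only [Bool.not_eq_true] at h1 h2 h3
    have k := main_key text (of_decide_eq_true h4)
    rw [h1, h2, h3, h4, ← k, h5]; simp
  · simp only [Bool.not_eq_true] at h1 h2 h3 h5
    have k := main_key text (of_decide_eq_true h4)
    rw [h1, h2, h3, h4, ← k, h5]; simp
  · simp only [Bool.not_eq_true] at h1 h2 h3 h4
    rw [h1, h2, h3, h4]; simp
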